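-- pv_equiv track=rewrite | github.com/langosco/meta-transformer | augmentations/permutation_augmentation.py | __get_next_layer
-- ===== SOURCE A (Python) =====
-- def __get_next_layer(checkpoint, layer):
--     found_current_layer = False
--     for layer_name in dict(checkpoint).keys():
--         if found_current_layer:
--             return layer_name
--         if layer_name == layer:
--             found_current_layer = True
--     return None
-- ===== SOURCE B (Python) =====
-- def __get_next_layer(checkpoint, layer):
--     keys = list(dict(checkpoint))
--     if layer not in keys:
--         return None
--     i = keys.index(layer)
--     return keys[i + 1] if i + 1 < len(keys) else None
-- ===== Notes on version B (the rewrite author's own statement) =====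
-- stated objective: alternative
-- what changed: Replaces the flag-carrying early-exit scan with positional logic: materialize the key list once, locate the layer's index, and take the successor key by index (or None at the end/absent).
import Mathlib
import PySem

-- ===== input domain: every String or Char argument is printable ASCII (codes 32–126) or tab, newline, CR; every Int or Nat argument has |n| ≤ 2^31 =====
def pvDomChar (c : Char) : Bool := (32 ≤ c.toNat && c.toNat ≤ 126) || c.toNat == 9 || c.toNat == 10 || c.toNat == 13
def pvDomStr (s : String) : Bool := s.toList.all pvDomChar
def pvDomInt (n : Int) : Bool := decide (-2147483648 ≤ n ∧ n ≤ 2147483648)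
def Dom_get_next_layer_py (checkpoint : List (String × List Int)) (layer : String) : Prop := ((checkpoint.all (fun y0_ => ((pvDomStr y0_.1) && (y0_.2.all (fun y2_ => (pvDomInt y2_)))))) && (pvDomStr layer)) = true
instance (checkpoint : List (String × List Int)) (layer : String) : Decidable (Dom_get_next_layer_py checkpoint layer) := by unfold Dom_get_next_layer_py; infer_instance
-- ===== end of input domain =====

-- B replaces A's flag-carrying early-exit scan with index arithmetic on the materialized key list (alternative decomposition, same cost).
-- ===== PORT A =====
-- A's for-loop with the found_current_layer flag, recursing over the dict's keys
def pvALoop (layer : String) : List String → Bool → Option String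
  | [], _ => none
  | k :: ks, found =>
    if found then some k
    else if k == layer then pvALoop layer ks true
    else pvALoop layer ks false

def get_next_layer_py (checkpoint : List (String × List Int)) (layer : String) : Option String :=
  pvALoop layer (PySem.Dict.ofList checkpoint).keys false

-- ===== PORT B =====
-- B: materialize the key list, locate the layer's position, take the successor by index
def get_next_layer_py_alt (checkpoint : List (String × List Int)) (layer : String) : Option String :=
  let keys := (PySem.Dict.ofList checkpoint).keys
  if layer ∈ keys then
    match PySem.List.index? keys layer with
    | some i => if h : i + 1 < keys.length then some keys[i + 1] else none
    | none => none
  else none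

-- ===== PRECONDITION & SPEC =====
def Spec_get_next_layer_py (checkpoint : List (String × List Int)) (layer : String) (out : Option String) : Prop := out = get_next_layer_py_alt checkpoint layer
instance (checkpoint : List (String × List Int)) (layer : String) (out : Option String) : Decidable (Spec_get_next_layer_py checkpoint layer out) := by unfold Spec_get_next_layer_py; infer_instance

-- ===== CLAIM (what is proved, stated in full; the proofs are below) =====
def Claim_equal_get_next_layer_py : Prop := ∀ (checkpoint : List (String × List Int)) (layer : String), Dom_get_next_layer_py checkpoint layer → Spec_get_next_layer_py checkpoint layer (get_next_layer_py checkpoint layer)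

-- ===== LEMMAS AND PROOFS =====

-- ===== VERDICT (by name: the statement is the Claim_ definition above) =====
lemma pvALoop_true (layer : String) (ks : List String) : pvALoop layer ks true = ks.head? := by
  cases ks <;> simp [pvALoop]

lemma pvALoop_eq (layer : String) (ks : List String) :
    pvALoop layer ks false =
      (if layer ∈ ks then
        match PySem.List.index? ks layer with
        | some i => if h : i + 1 < ks.length then some ks[i + 1] else none
        | none => none
      else none) := by
  induction ks with
  | nil => simp [pvALoop]
  | cons k ks ih =>
    by_cases hk : k = layer
    · subst hk
      rw [pvALoop]
      simp only [beq_self_eq_true, if_true, pvALoop_true,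
        PySem.List.index?_cons_self, List.mem_cons, true_or, if_true]
      cases ks <;> simp
    · rw [pvALoop]
      have hbeq : (k == layer) = false := by simp [hk]
      rw [PySem.List.index?_cons_of_ne ks hk]
      simp only [hbeq, if_false, ih, List.mem_cons]
      by_cases hm : layer ∈ ks
      · have : ¬ (layer = k) := fun h => hk h.symm
        simp only [this, false_or, hm, if_true]
        rcases h : PySem.List.index? ks layer with _ | i
        · rw [PySem.List.index?_eq_none_iff] at h; exact absurd hm h
        · simp only [h, Option.map_some, List.length_cons]
          by_cases hi : i + 1 < ks.length
          · rw [dif_pos hi, dif_pos (by omega)]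
            simp
          · rw [dif_neg hi, dif_neg (by omega)]
            simp
      · have hnone : PySem.List.index? ks layer = none := by
          rw [PySem.List.index?_eq_none_iff]; exact hm
        have : ¬ (layer = k ∨ layer ∈ ks) := by
          rintro (h | h); exact hk h.symm; exact hm h
        simp [this, hnone]
        exact fun h => absurd h hm

theorem get_next_layer_py_spec : Claim_equal_get_next_layer_py := by
  intro checkpoint layer _
  unfold Spec_get_next_layer_py get_next_layer_py get_next_layer_py_alt
  exact pvALoop_eq layer _
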